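-- pv_equiv track=rewrite | github.com/netor27/codefights-arcade-solutions | arcade/python/arcade-theCore/18_SecretArchives/149_ChessNotation.py | getNotationFromMatrix
-- ===== SOURCE A (Python) =====
-- def getNotationFromMatrix(matrix):
--     notation = []
--     for row in matrix:
--         counter = 0
--         for piece in row:
--             if piece == None:
--                 counter += 1
--             else:
--                 if counter > 0:
--                     notation.append(str(counter))
--                     counter = 0
--                 notation.append(piece)
--         if counter > 0:
--             notation.append(str(counter))
--         notation.append("/")
--
--     # join every char except the last diagonal "/"
--     return "".join(notation[:-1])
-- ===== SOURCE B (Python) =====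
-- def getNotationFromMatrix(matrix):
--     # Run-scanning with index pointers per row, then join row strings with '/'.
--     def row_str(row):
--         i, n, parts = 0, len(row), []
--         while i < n:
--             if row[i] == None:
--                 j = i
--                 while j < n and row[j] == None:
--                     j += 1
--                 parts.append(str(j - i))
--                 i = j
--             else:
--                 parts.append(row[i])
--                 i += 1
--         return "".join(parts)
--     return "/".join(row_str(row) for row in matrix)
-- ===== Notes on version B (the rewrite author's own statement) =====
-- stated objective: idiomatic
-- what changed: A threads a counter/flush accumulator through one global notation list and strips the trailing '/' at the end; B scans each row for maximal runs with index pointers (emitting run lengths for None-runs, pieces verbatim), builds one string per row, and joins the row strings with '/'.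
import Mathlib
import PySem

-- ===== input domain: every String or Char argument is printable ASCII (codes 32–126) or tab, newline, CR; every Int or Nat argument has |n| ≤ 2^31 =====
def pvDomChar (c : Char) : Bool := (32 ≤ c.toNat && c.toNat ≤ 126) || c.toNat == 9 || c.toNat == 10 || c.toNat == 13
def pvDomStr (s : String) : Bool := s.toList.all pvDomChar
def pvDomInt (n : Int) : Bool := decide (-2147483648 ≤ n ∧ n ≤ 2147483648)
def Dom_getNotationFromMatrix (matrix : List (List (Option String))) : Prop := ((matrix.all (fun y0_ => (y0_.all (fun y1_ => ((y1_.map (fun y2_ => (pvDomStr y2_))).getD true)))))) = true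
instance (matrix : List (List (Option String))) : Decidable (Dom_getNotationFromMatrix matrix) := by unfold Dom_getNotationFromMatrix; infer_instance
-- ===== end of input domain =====

-- B replaces A's global accumulator with counter/flush bookkeeping by per-row run scanning
-- joined with '/'; objective: idiomatic (same cost). Return values proved equal on all inputs.

-- ===== PORT A =====
-- the inner-loop body of A (counter state = (notation so far, counter))
def pvStepA (st : List String × Int) (piece : Option String) : List String × Int :=
  match piece with
  | none => (st.1, st.2 + 1)
  | some p => ((if st.2 > 0 then st.1 ++ [PySem.Int.toStr st.2] else st.1) ++ [p], 0)

-- A's "if counter > 0: notation.append(str(counter))" after the row loop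
def pvFlushA (st : List String × Int) : List String :=
  if st.2 > 0 then st.1 ++ [PySem.Int.toStr st.2] else st.1

def getNotationFromMatrix (matrix : List (List (Option String))) : String :=
  let nt : List String :=
    matrix.foldl (fun nt row =>
      pvFlushA (row.foldl pvStepA (nt, 0)) ++ ["/"]) []
  PySem.Str.join "" (PySem.List.slice nt none (some (-1)))

-- ===== PORT B =====
-- Source B's inner while loop: emit the length of each maximal run of None, pieces verbatim
def pvRunParts : List (Option String) → List String
  | [] => []
  | some s :: xs => s :: pvRunParts xs
  | none :: xs =>
      PySem.Int.toStr (1 + ((xs.takeWhile Option.isNone).length : Int))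
        :: pvRunParts (xs.dropWhile Option.isNone)
termination_by xs => xs.length
decreasing_by
  · simp
  · have := List.length_dropWhile_le Option.isNone xs
    simp; omega

def getNotationFromMatrix_alt (matrix : List (List (Option String))) : String :=
  PySem.Str.join "/" (matrix.map (fun row => PySem.Str.join "" (pvRunParts row)))

-- ===== PRECONDITION & SPEC =====
def Spec_getNotationFromMatrix (matrix : List (List (Option String))) (out : String) : Prop := out = getNotationFromMatrix_alt matrix
instance (matrix : List (List (Option String))) (out : String) : Decidable (Spec_getNotationFromMatrix matrix out) := by unfold Spec_getNotationFromMatrix; infer_instance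

-- ===== CLAIM (what is proved, stated in full; the proofs are below) =====
def Claim_equal_getNotationFromMatrix : Prop := ∀ (matrix : List (List (Option String))), Dom_getNotationFromMatrix matrix → Spec_getNotationFromMatrix matrix (getNotationFromMatrix matrix)

-- ===== LEMMAS AND PROOFS =====

-- proof-side recursive form of A's inner loop (counter threaded explicitly)
def pvParts : Int → List (Option String) → List String
  | c, [] => if c > 0 then [PySem.Int.toStr c] else []
  | c, none :: xs => pvParts (c + 1) xs
  | c, some s :: xs => (if c > 0 then [PySem.Int.toStr c] else []) ++ s :: pvParts 0 xs

-- the accumulated notation is a pure prefix of the inner fold's state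
theorem pvFoldA_prefix (row : List (Option String)) (a b : List String) (c : Int) :
    row.foldl pvStepA (a ++ b, c)
      = (a ++ (row.foldl pvStepA (b, c)).1, (row.foldl pvStepA (b, c)).2) := by
  induction row generalizing a b c with
  | nil => simp
  | cons p xs ih =>
    cases p with
    | none => simpa [pvStepA] using ih a b (c + 1)
    | some s =>
      simp only [List.foldl_cons, pvStepA]
      have h : (if c > 0 then (a ++ b) ++ [PySem.Int.toStr c] else a ++ b) ++ [s]
          = a ++ ((if c > 0 then b ++ [PySem.Int.toStr c] else b) ++ [s]) := by
        split_ifs <;> simp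
      rw [h, ih]

theorem pvFoldA_prefix0 (row : List (Option String)) (a : List String) (c : Int) :
    row.foldl pvStepA (a, c)
      = (a ++ (row.foldl pvStepA ([], c)).1, (row.foldl pvStepA ([], c)).2) := by
  simpa using pvFoldA_prefix row a [] c

theorem pvFlushA_append (a l : List String) (c : Int) :
    pvFlushA (a ++ l, c) = a ++ pvFlushA (l, c) := by
  simp only [pvFlushA]; split_ifs <;> simp

-- A's flushed inner fold is pvParts
theorem pvFoldA_eq_pvParts (row : List (Option String)) (c : Int) :
    pvFlushA (row.foldl pvStepA ([], c)) = pvParts c row := by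
  induction row generalizing c with
  | nil => simp [pvFlushA, pvParts]
  | cons p xs ih =>
    cases p with
    | none => simpa [pvStepA, pvParts] using ih (c + 1)
    | some s =>
      simp only [List.foldl_cons, pvStepA, pvParts]
      rw [pvFoldA_prefix0, pvFlushA_append, ih 0]
      split_ifs <;> simp

-- pvParts is B's run scan (joint statement for the pending-counter case)
theorem pvParts_eq_pvRunParts (row : List (Option String)) :
    pvParts 0 row = pvRunParts row
    ∧ ∀ c : Int, 0 ≤ c →
        pvParts (c + 1) row
          = PySem.Int.toStr (c + 1 + ((row.takeWhile Option.isNone).length : Int))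
              :: pvRunParts (row.dropWhile Option.isNone) := by
  induction row with
  | nil =>
    refine ⟨by simp [pvParts, pvRunParts], fun c hc => ?_⟩
    simp [pvParts, pvRunParts, show (0:Int) < c + 1 by omega]
  | cons p xs ih =>
    cases p with
    | some s =>
      constructor
      · simp [pvParts, pvRunParts, ih.1]
      · intro c hc
        simp [pvParts, pvRunParts, List.takeWhile, List.dropWhile, Option.isNone,
          show (0:Int) < c + 1 by omega, ih.1]
    | none =>
      constructor
      · have h := ih.2 0 le_rfl
        simpa [pvParts, pvRunParts, List.takeWhile, List.dropWhile, Option.isNone] using h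
      · intro c hc
        have h := ih.2 (c + 1) (by omega)
        simp only [pvParts, List.takeWhile, List.dropWhile, Option.isNone]
        rw [h]
        congr 2
        simp only [List.length_cons]
        push_cast
        ring

-- outer loop: the notation list is the concatenation of per-row parts, each closed by "/"
theorem pvOuter_eq_flatMap (matrix : List (List (Option String))) (acc : List String) :
    matrix.foldl (fun nt row =>
        pvFlushA (row.foldl pvStepA (nt, 0)) ++ ["/"]) acc
      = acc ++ matrix.flatMap (fun row => pvRunParts row ++ ["/"]) := by
  induction matrix generalizing acc with
  | nil => simp
  | cons r m ih =>
    simp only [List.foldl_cons, List.flatMap_cons]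
    rw [pvFoldA_prefix0, pvFlushA_append, pvFoldA_eq_pvParts, (pvParts_eq_pvRunParts r).1, ih]
    simp

-- ''.join is flatten (on the char-list side)
theorem pvJoinEmpty (parts : List (List Char)) :
    PySem.Chars.join [] parts = parts.flatten := by
  induction parts with
  | nil => simp [PySem.Chars.join_nil]
  | cons p rest ih =>
    cases rest with
    | nil => simp [PySem.Chars.join_singleton]
    | cons q r => rw [PySem.Chars.join_cons_cons, ih]; simp

theorem pvRowString (row : List (Option String)) :
    (PySem.Str.join "" (pvRunParts row)).toList
      = ((pvRunParts row).map String.toList).flatten := by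
  rw [PySem.Str.toList_join, show ("" : String).toList = [] from rfl, pvJoinEmpty]

-- joining everything minus the final "/" equals interleaving row strings with '/'
theorem pvMain (matrix : List (List (Option String))) :
    ((matrix.flatMap (fun row => pvRunParts row ++ ["/"])).dropLast.map String.toList).flatten
      = PySem.Chars.join ['/']
          (matrix.map (fun row => (PySem.Str.join "" (pvRunParts row)).toList)) := by
  induction matrix with
  | nil => simp [PySem.Chars.join_nil]
  | cons r m ih =>
    cases m with
    | nil =>
      simp only [List.flatMap_cons, List.flatMap_nil, List.append_nil,
        List.dropLast_concat, List.map_cons, List.map_nil,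
        PySem.Chars.join_singleton, pvRowString]
    | cons r2 m2 =>
      have hne : (r2 :: m2).flatMap (fun row => pvRunParts row ++ ["/"]) ≠ [] := by
        simp
      rw [List.flatMap_cons, List.dropLast_append_of_ne_nil hne,
        List.map_append, List.flatten_append, ih]
      simp only [List.map_cons, PySem.Chars.join_cons_cons, List.map_append,
        List.flatten_append, pvRowString]
      simp

-- ===== VERDICT (by name: the statement is the Claim_ definition above) =====
theorem getNotationFromMatrix_spec : Claim_equal_getNotationFromMatrix := by
  intro matrix _
  show getNotationFromMatrix matrix = getNotationFromMatrix_alt matrix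
  apply String.toList_inj.mp
  simp only [getNotationFromMatrix, getNotationFromMatrix_alt]
  rw [pvOuter_eq_flatMap, List.nil_append, PySem.List.slice_to_neg_one,
    PySem.Str.toList_join, PySem.Str.toList_join,
    show ("" : String).toList = [] from rfl, show ("/" : String).toList = ['/'] from rfl,
    pvJoinEmpty, List.map_map]
  exact pvMain matrix
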